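-- pv_equiv track=rewrite | github.com/GeniaHarrietBoeing/Rosalind | 2SAT.py | is_2sat
-- ===== SOURCE A (Python) =====
-- def is_2sat(lst_scc, nr_nodes):
--     for scc in lst_scc:
--         for i in scc:
--             original_node = i - nr_nodes
--             negative_node = -1 * original_node
--             offset_negative_node = negative_node + nr_nodes
--
--             if (offset_negative_node) in scc:
--                 return 0
--     return 1
-- ===== SOURCE B (Python) =====
-- def is_2sat(lst_scc, nr_nodes):
--     # Build a global index: node -> set of indices of the SCCs containing it.
--     ids = {}
--     for idx, scc in enumerate(lst_scc):
--         for x in scc: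
--             ids.setdefault(x, set()).add(idx)
--     # One flat verification pass over the distinct nodes.
--     for x, s in ids.items():
--         t = ids.get(2 * nr_nodes - x)
--         if t is not None and not s.isdisjoint(t):
--             return 0
--     return 1
-- ===== Notes on version B (the rewrite author's own statement) =====
-- stated objective: faster
-- what changed: Instead of A's nested per-SCC scan with a linear 'in scc' membership test for every literal, B builds one global hash index node -> set of SCC indices in a single pass, then makes one flat pass over the distinct nodes checking whether a node and its complement 2*nr_nodes - i share an SCC index.
import Mathlib
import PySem

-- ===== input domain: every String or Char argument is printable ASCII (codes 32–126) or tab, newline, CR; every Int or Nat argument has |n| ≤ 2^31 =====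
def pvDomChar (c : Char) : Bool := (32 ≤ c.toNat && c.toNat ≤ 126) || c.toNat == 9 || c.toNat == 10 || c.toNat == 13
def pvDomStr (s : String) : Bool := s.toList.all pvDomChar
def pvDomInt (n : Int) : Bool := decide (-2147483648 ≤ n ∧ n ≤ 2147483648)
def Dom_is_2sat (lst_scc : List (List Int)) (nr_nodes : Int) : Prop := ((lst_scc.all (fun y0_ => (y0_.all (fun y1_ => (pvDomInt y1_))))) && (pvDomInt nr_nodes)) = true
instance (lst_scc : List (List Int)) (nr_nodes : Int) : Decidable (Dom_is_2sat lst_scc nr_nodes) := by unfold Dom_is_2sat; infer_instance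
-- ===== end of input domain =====

-- B replaces A's nested per-SCC membership scanning by a global node→SCC-index table built once,
-- then a single flat verification pass; objective: faster.

-- ===== PORT A =====
-- inner loop 'for i in scc: … if offset in scc: return 0'
def pvAInner (nr : Int) (scc : List Int) : List Int → Bool
  | [] => false
  | i :: rest =>
    let original_node := i - nr
    let negative_node := -1 * original_node
    let offset_negative_node := negative_node + nr
    if scc.contains offset_negative_node then true else pvAInner nr scc rest

-- outer loop 'for scc in lst_scc'
def pvAOuter (nr : Int) : List (List Int) → Int
  | [] => 1
  | scc :: rest => if pvAInner nr scc scc then 0 else pvAOuter nr rest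

def is_2sat (lst_scc : List (List Int)) (nr_nodes : Int) : Int :=
  pvAOuter nr_nodes lst_scc

-- ===== PORT B =====
-- 'for idx, scc in enumerate(lst_scc): for x in scc: ids.setdefault(x, set()).add(idx)'
def pvBuild (lst_scc : List (List Int)) : PySem.Dict Int (PySem.Set Int) :=
  (PySem.List.enumerate lst_scc).foldl
    (fun d p => p.2.foldl
      (fun d x => d.modify x PySem.Set.empty (fun s => PySem.Set.add s p.1)) d)
    PySem.Dict.empty

-- 'for x, s in ids.items(): t = ids.get(2*nr_nodes - x); if t is not None and not s.isdisjoint(t): return 0'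
def pvScan (ids : PySem.Dict Int (PySem.Set Int)) (nr : Int) : List (Int × PySem.Set Int) → Int
  | [] => 1
  | (x, s) :: rest =>
    match ids.get? (2 * nr - x) with
    | some t => if !(PySem.Set.isdisjoint s t) then 0 else pvScan ids nr rest
    | none => pvScan ids nr rest

def is_2sat_alt (lst_scc : List (List Int)) (nr_nodes : Int) : Int :=
  let ids := pvBuild lst_scc
  pvScan ids nr_nodes ids.items

-- ===== PRECONDITION & SPEC =====
def Spec_is_2sat (lst_scc : List (List Int)) (nr_nodes : Int) (out : Int) : Prop := out = is_2sat_alt lst_scc nr_nodes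
instance (lst_scc : List (List Int)) (nr_nodes : Int) (out : Int) : Decidable (Spec_is_2sat lst_scc nr_nodes out) := by unfold Spec_is_2sat; infer_instance

-- ===== CLAIM (what is proved, stated in full; the proofs are below) =====
def Claim_equal_is_2sat : Prop := ∀ (lst_scc : List (List Int)) (nr_nodes : Int), Dom_is_2sat lst_scc nr_nodes → Spec_is_2sat lst_scc nr_nodes (is_2sat lst_scc nr_nodes)

-- ===== LEMMAS AND PROOFS =====

-- A's inner loop detects an i in the remaining list whose complement 2*nr - i is in scc
theorem pvAInner_eq_true_iff (nr : Int) (scc l : List Int) :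
    pvAInner nr scc l = true ↔ ∃ i ∈ l, (2 * nr - i) ∈ scc := by
  induction l with
  | nil => simp [pvAInner]
  | cons i rest ih =>
    have h2 : -1 * (i - nr) + nr = 2 * nr - i := by ring
    simp only [pvAInner, h2]
    by_cases hc : (2 * nr - i) ∈ scc
    · simp [hc]
    · simp [hc, ih]

theorem pvAOuter_eq (nr : Int) (lst : List (List Int)) :
    pvAOuter nr lst = if ∃ scc ∈ lst, ∃ i ∈ scc, (2 * nr - i) ∈ scc then 0 else 1 := by
  induction lst with
  | nil => simp [pvAOuter]
  | cons scc rest ih =>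
    simp only [pvAOuter, ih]
    by_cases h : ∃ i ∈ scc, (2 * nr - i) ∈ scc
    · simp [(pvAInner_eq_true_iff nr scc scc).2 h, h]
    · have hb : pvAInner nr scc scc = false := by
        cases hx : pvAInner nr scc scc
        · rfl
        · exact absurd ((pvAInner_eq_true_iff nr scc scc).1 hx) h
      simp [hb, h]

-- inner build loop: membership in the indexed set after folding one SCC
theorem pvBuildInner_mem (scc : List Int) (idx : Int)
    (d : PySem.Dict Int (PySem.Set Int)) (x j : Int) :
    j ∈ (scc.foldl (fun d x => d.modify x PySem.Set.empty (fun s => PySem.Set.add s idx)) d).getD x PySem.Set.empty ↔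
      j ∈ d.getD x PySem.Set.empty ∨ (x ∈ scc ∧ j = idx) := by
  induction scc generalizing d with
  | nil => simp
  | cons y rest ih =>
    simp only [List.foldl_cons, ih, List.mem_cons]
    rw [PySem.Dict.getD_modify]
    by_cases hxy : x = y
    · subst hxy
      simp only [if_true, PySem.Set.mem_add]
      tauto
    · rw [if_neg hxy]
      tauto

-- outer build loop: j indexes an SCC containing x
theorem pvBuildOuter_mem (ls : List (List Int)) (s : Int)
    (d : PySem.Dict Int (PySem.Set Int)) (x j : Int) :
    j ∈ ((PySem.List.enumerate ls s).foldl
        (fun d p => p.2.foldl (fun d x => d.modify x PySem.Set.empty (fun s => PySem.Set.add s p.1)) d) d).getD x PySem.Set.empty ↔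
      j ∈ d.getD x PySem.Set.empty ∨ ∃ k : Nat, ∃ _ : k < ls.length, j = s + k ∧ x ∈ ls[k] := by
  induction ls generalizing s d with
  | nil => simp [PySem.List.enumerate]
  | cons scc rest ih =>
    rw [PySem.List.enumerate_cons]
    simp only [List.foldl_cons]
    rw [ih, pvBuildInner_mem]
    constructor
    · rintro ((h | ⟨hx, rfl⟩) | ⟨k, hk, rfl, hmem⟩)
      · exact Or.inl h
      · exact Or.inr ⟨0, by simp, by simp, by simpa using hx⟩
      · exact Or.inr ⟨k + 1, by simpa using hk, by push_cast; ring, by simpa using hmem⟩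
    · rintro (h | ⟨k, hk, rfl, hmem⟩)
      · exact Or.inl (Or.inl h)
      · cases k with
        | zero => exact Or.inl (Or.inr ⟨by simpa using hmem, by simp⟩)
        | succ k =>
          exact Or.inr ⟨k, by simpa using hk, by push_cast; ring, by simpa using hmem⟩

theorem pvBuild_mem (lst : List (List Int)) (x j : Int) :
    j ∈ (pvBuild lst).getD x PySem.Set.empty ↔
      ∃ k : Nat, ∃ _ : k < lst.length, j = (k : Int) ∧ x ∈ lst[k] := by
  rw [pvBuild, pvBuildOuter_mem]
  simp

theorem pvBuild_nodup_keys (lst : List (List Int)) : (pvBuild lst).keys.Nodup := by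
  have H : ∀ (l : List (Int × List Int)) (d : PySem.Dict Int (PySem.Set Int)),
      d.keys.Nodup →
      (l.foldl (fun d p => p.2.foldl
        (fun d x => d.modify x PySem.Set.empty (fun s => PySem.Set.add s p.1)) d) d).keys.Nodup := by
    intro l
    induction l with
    | nil => intro d hd; simpa using hd
    | cons p rest ih =>
      intro d hd
      simp only [List.foldl_cons]
      exact ih _ (PySem.Dict.nodup_keys_foldl_modify_key p.2 (fun x => x) PySem.Set.empty
        (fun _ _ => fun s => PySem.Set.add s p.1) d hd)
  exact H _ _ PySem.Dict.nodup_keys_empty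

-- scan loop: 0 iff some listed node shares an SCC index with its complement
theorem pvScan_eq (ids : PySem.Dict Int (PySem.Set Int)) (nr : Int) (l : List (Int × PySem.Set Int)) :
    pvScan ids nr l =
      if ∃ p ∈ l, ∃ t, ids.get? (2 * nr - p.1) = some t ∧ PySem.Set.isdisjoint p.2 t = false
      then 0 else 1 := by
  induction l with
  | nil => simp [pvScan]
  | cons p rest ih =>
    obtain ⟨x, s⟩ := p
    have hcons : (∃ q ∈ (x, s) :: rest, ∃ t, ids.get? (2 * nr - q.1) = some t ∧ PySem.Set.isdisjoint q.2 t = false) ↔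
        (∃ t, ids.get? (2 * nr - x) = some t ∧ PySem.Set.isdisjoint s t = false) ∨
        (∃ q ∈ rest, ∃ t, ids.get? (2 * nr - q.1) = some t ∧ PySem.Set.isdisjoint q.2 t = false) := by
      simp only [List.mem_cons]
      constructor
      · rintro ⟨q, (rfl | hq), t, ht, hd⟩
        · exact Or.inl ⟨t, ht, hd⟩
        · exact Or.inr ⟨q, hq, t, ht, hd⟩
      · rintro (⟨t, ht, hd⟩ | ⟨q, hq, t, ht, hd⟩)
        · exact ⟨(x, s), Or.inl rfl, t, ht, hd⟩
        · exact ⟨q, Or.inr hq, t, ht, hd⟩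
    simp only [pvScan, hcons]
    cases hg : ids.get? (2 * nr - x) with
    | none =>
      dsimp only
      rw [ih]
      have hno : ¬ ∃ t, (none : Option (PySem.Set Int)) = some t ∧ PySem.Set.isdisjoint s t = false := by
        simp
      simp only [hno, false_or]
    | some t =>
      dsimp only
      cases hd : PySem.Set.isdisjoint s t with
      | false =>
        simp only [Bool.not_false, if_true]
        rw [if_pos (Or.inl ⟨t, rfl, hd⟩)]
      | true =>
        simp only [Bool.not_true, Bool.false_eq_true, if_false, ih]
        have hno : ¬ ∃ t', (some t = some t') ∧ PySem.Set.isdisjoint s t' = false := by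
          rintro ⟨t', ht', hd'⟩
          cases ht'
          simp [hd] at hd'
        simp only [hno, false_or]

-- the two existence conditions agree
theorem pvCond_iff (lst : List (List Int)) (nr : Int) :
    (∃ scc ∈ lst, ∃ i ∈ scc, (2 * nr - i) ∈ scc) ↔
      (∃ p ∈ (pvBuild lst).items, ∃ t, (pvBuild lst).get? (2 * nr - p.1) = some t ∧
        PySem.Set.isdisjoint p.2 t = false) := by
  constructor
  · rintro ⟨scc, hscc, i, hi, hcomp⟩
    obtain ⟨k, hk, rfl⟩ := List.mem_iff_getElem.1 hscc
    have h1 : (k : Int) ∈ (pvBuild lst).getD i PySem.Set.empty :=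
      (pvBuild_mem lst i (k : Int)).2 ⟨k, hk, rfl, hi⟩
    have h2 : (k : Int) ∈ (pvBuild lst).getD (2 * nr - i) PySem.Set.empty :=
      (pvBuild_mem lst (2 * nr - i) (k : Int)).2 ⟨k, hk, rfl, hcomp⟩
    obtain ⟨s, hgs⟩ : ∃ s, (pvBuild lst).get? i = some s := by
      cases hg : (pvBuild lst).get? i with
      | none =>
        rw [PySem.Dict.getD_of_get?_eq_none _ PySem.Set.empty hg] at h1
        exact absurd h1 (List.not_mem_nil)
      | some s => exact ⟨s, rfl⟩
    obtain ⟨t, hgt⟩ : ∃ t, (pvBuild lst).get? (2 * nr - i) = some t := by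
      cases hg : (pvBuild lst).get? (2 * nr - i) with
      | none =>
        rw [PySem.Dict.getD_of_get?_eq_none _ PySem.Set.empty hg] at h2
        exact absurd h2 (List.not_mem_nil)
      | some t => exact ⟨t, rfl⟩
    rw [PySem.Dict.getD_of_get?_eq_some _ PySem.Set.empty hgs] at h1
    rw [PySem.Dict.getD_of_get?_eq_some _ PySem.Set.empty hgt] at h2
    refine ⟨(i, s), PySem.Dict.mem_items_of_get?_eq_some _ hgs, t, hgt, ?_⟩
    cases hd : PySem.Set.isdisjoint s t with
    | false => rfl
    | true => exact absurd h2 ((PySem.Set.isdisjoint_iff s t).1 hd _ h1)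
  · rintro ⟨⟨x, s⟩, hmem, t, hgt, hdf⟩
    have hgs : (pvBuild lst).get? x = some s :=
      PySem.Dict.get?_of_mem_items _ hmem (pvBuild_nodup_keys lst)
    have hnd : ¬ ∀ j ∈ s, j ∉ t := by
      intro hall
      rw [← PySem.Set.isdisjoint_iff s t] at hall
      rw [hdf] at hall
      cases hall
    push Not at hnd
    obtain ⟨j, hjs, hjt⟩ := hnd
    rw [← PySem.Dict.getD_of_get?_eq_some _ PySem.Set.empty hgs] at hjs
    rw [← PySem.Dict.getD_of_get?_eq_some _ PySem.Set.empty hgt] at hjt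
    obtain ⟨k, hk, rfl, hxk⟩ := (pvBuild_mem lst x j).1 hjs
    obtain ⟨k', hk', hkk, hck⟩ := (pvBuild_mem lst (2 * nr - x) ((k : Nat) : Int)).1 hjt
    have : k = k' := by exact_mod_cast hkk
    subst this
    exact ⟨lst[k], List.getElem_mem hk, x, hxk, hck⟩

-- ===== VERDICT (by name: the statement is the Claim_ definition above) =====
theorem is_2sat_spec : Claim_equal_is_2sat := by
  intro lst nr _
  unfold Spec_is_2sat
  show pvAOuter nr lst = pvScan (pvBuild lst) nr (pvBuild lst).items
  rw [pvAOuter_eq, pvScan_eq]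
  exact if_congr (pvCond_iff lst nr) rfl rfl
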